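-- pv_equiv track=rewrite | github.com/Thabo08/league-table-standings | main/rank_teams.py | league_rankings
-- ===== SOURCE A (Python) =====
-- class RankManager:
--     """Helper class to manage rankings."""
--
--     def __init__(self):
--         self.current_rank = 0
--         self.previous_rank = 0
--
--     def get_rank(self, same_points=False):
--         self.current_rank += 1
--         if same_points:
--             return self.previous_rank
--         else:
--             self.previous_rank = self.current_rank
--             return self.current_rank
--
-- def _rank_formatter(rank: int, name: str, points: int, next_line: bool) -> str:
--     pts = "pt" if points == 1 else "pts"
--     pts = f"{pts}\n" if next_line else pts
--     return f"{rank}. {name}, {points} {pts}"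
--
-- def league_rankings(teams_with_points: dict) -> str:
--     """ Ranks all the teams based on their accumulated points
--
--         Args:
--             teams_with_points: A dict of teams with their total accumulated points
--
--         Returns:
--             League table standings in string format
--     """
--     if not teams_with_points:
--         raise ValueError("No teams with points found")
--     sorted_teams = sorted(teams_with_points.items(), key=lambda x: x[1])
--     num_teams = len(sorted_teams)
--     num_teams_placed = 0
--     rank_manager = RankManager()
--     prev = None
--     ranks = ""
--     for i in range(num_teams - 1, -1, -1):
--         name, points = sorted_teams[i]
--         same_points = False
--         if prev is not None:
--             current_team_points = teams_with_points.get(name)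
--             prev_team_points = teams_with_points.get(prev)
--             same_points = current_team_points == prev_team_points
--         rank = rank_manager.get_rank(same_points)
--         next_line = num_teams_placed < num_teams - 1
--         ranks += _rank_formatter(rank, name, points, next_line)
--         prev = name
--         num_teams_placed += 1
--     return ranks
-- ===== SOURCE B (Python) =====
-- def league_rankings(teams_with_points: dict) -> str:
--     """ Ranks all the teams based on their accumulated points (competition ranking).
--
--         The rank of a team is 1 + the number of teams with strictly more points.
--         In the descending order that count is simply the first position at which the
--         team's points value occurs, so one pass builds a points -> rank-offset index
--         and every line is then a plain dict lookup.
--     """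
--     if not teams_with_points:
--         raise ValueError("No teams with points found")
--     order = sorted(teams_with_points.items(), key=lambda x: x[1])[::-1]
--     higher = {}  # points value -> number of teams with strictly more points
--     i = 0
--     for _name, p in order:
--         if p not in higher:
--             higher[p] = i
--         i += 1
--     lines = ["{}. {}, {} {}".format(1 + higher[p], name, p, "pt" if p == 1 else "pts")
--              for name, p in order]
--     return "\n".join(lines)
-- ===== Notes on version B (the rewrite author's own statement) =====
-- stated objective: alternative
-- what changed: Replaces the stateful index loop (RankManager object, prev-name dict lookups, manual newline flag) with a closed form: one pass over the descending list builds a dict mapping each points value to the number of teams with strictly more points (its first index), then each line's rank is a single dict lookup and the lines are joined with '\n'.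
import Mathlib
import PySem

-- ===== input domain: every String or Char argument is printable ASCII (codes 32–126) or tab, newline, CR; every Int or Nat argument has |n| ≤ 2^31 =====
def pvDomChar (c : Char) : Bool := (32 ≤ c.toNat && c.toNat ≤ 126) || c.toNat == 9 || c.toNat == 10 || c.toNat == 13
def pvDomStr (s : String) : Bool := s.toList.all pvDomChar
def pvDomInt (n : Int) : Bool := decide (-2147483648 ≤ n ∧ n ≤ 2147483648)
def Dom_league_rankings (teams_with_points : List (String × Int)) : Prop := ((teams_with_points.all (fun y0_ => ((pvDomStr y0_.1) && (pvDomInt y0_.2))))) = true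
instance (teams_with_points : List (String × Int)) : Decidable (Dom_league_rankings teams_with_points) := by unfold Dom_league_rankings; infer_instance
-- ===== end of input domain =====

-- B replaces A's stateful rank loop (RankManager + prev-name dict lookups + newline flag) by the
-- per-team closed form "rank = 1 + number of teams with strictly more points", joining lines with
-- '\n' (objective: alternative decomposition, similar cost).


-- ===== PORT A =====
-- _rank_formatter
def pvRankFormatter (rank : Int) (name : String) (points : Int) (next_line : Bool) : String :=
  let pts : String := if points == 1 then "pt" else "pts"
  let pts : String := if next_line then pts ++ "\n" else pts
  PySem.Int.toStr rank ++ ". " ++ name ++ ", " ++ PySem.Int.toStr points ++ " " ++ pts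

-- loop state: (num_teams_placed, current_rank, previous_rank, prev, ranks); the RankManager
-- object is the (current_rank, previous_rank) part of the state.
def league_rankings (teams_with_points : List (String × Int)) : String :=
  -- 'if not teams_with_points: raise ValueError(...)' — excluded by Pre_league_rankings
  let sorted_teams := PySem.List.sorted teams_with_points (fun x => x.2)
  let num_teams : Int := (sorted_teams.length : Int)
  let st := (PySem.List.pyRange (num_teams - 1) (-1) (-1)).foldl
    (fun (st : Int × Int × Int × Option String × String) i =>
      match PySem.List.pyGet? sorted_teams i with
      | none => st   -- unreachable: every i of range(num_teams-1,-1,-1) is a valid index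
      | some np =>
        let (num_teams_placed, current_rank, previous_rank, prev, ranks) := st
        let same_points : Bool :=
          match prev with
          | none => false
          | some pn => (PySem.Dict.get? (PySem.Dict.mk teams_with_points) np.1)
                        == (PySem.Dict.get? (PySem.Dict.mk teams_with_points) pn)
        let current_rank := current_rank + 1
        let rp : Int × Int :=
          if same_points then (previous_rank, previous_rank) else (current_rank, current_rank)
        let next_line : Bool := decide (num_teams_placed < num_teams - 1)
        (num_teams_placed + 1, current_rank, rp.2, some np.1,
         ranks ++ pvRankFormatter rp.1 np.1 np.2 next_line))
    ((0 : Int), (0 : Int), (0 : Int), (none : Option String), "")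
  st.2.2.2.2

-- ===== PORT B =====
def league_rankings_alt (teams_with_points : List (String × Int)) : String :=
  -- B raises the same ValueError on the empty dict — excluded by Pre_league_rankings
  let order := (PySem.List.slice? (PySem.List.sorted teams_with_points (fun x => x.2))
                  none none (-1)).getD []   -- [::-1]; the step -1 never yields none
  -- higher: points value -> number of teams with strictly more points (loop state (i, higher))
  let higher := (order.foldl
    (fun (s : Int × PySem.Dict Int Int) np =>
      (s.1 + 1, if s.2.contains np.2 then s.2 else s.2.insert np.2 s.1))
    ((0 : Int), PySem.Dict.empty)).2
  let lines := order.map (fun np =>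
    PySem.Int.toStr (1 + (higher.get? np.2).getD 0) ++ ". " ++ np.1 ++ ", "
      ++ PySem.Int.toStr np.2 ++ " " ++ (if np.2 == 1 then "pt" else "pts"))
  PySem.Str.join "\n" lines

-- ===== PRECONDITION & SPEC =====
-- Pre_ excludes (a) the empty list, on which A (and B) raise ValueError, and (b) association
-- lists with duplicate keys, which do not represent a Python dict (dict keys are unique).
def Pre_league_rankings (teams_with_points : List (String × Int)) : Prop :=
  teams_with_points ≠ [] ∧ (teams_with_points.map Prod.fst).Nodup
instance (teams_with_points : List (String × Int)) : Decidable (Pre_league_rankings teams_with_points) := by unfold Pre_league_rankings; infer_instance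
def pvWitness_league_rankings : (List (String × Int)) := [("arsenal", 9), ("spurs", 7), ("chelsea", 9)]

def Spec_league_rankings (teams_with_points : List (String × Int)) (out : String) : Prop := out = league_rankings_alt teams_with_points
instance (teams_with_points : List (String × Int)) (out : String) : Decidable (Spec_league_rankings teams_with_points out) := by unfold Spec_league_rankings; infer_instance

-- ===== CLAIM (what is proved, stated in full; the proofs are below) =====
def Claim_equal_league_rankings : Prop := ∀ (teams_with_points : List (String × Int)), Dom_league_rankings teams_with_points → Pre_league_rankings teams_with_points → Spec_league_rankings teams_with_points (league_rankings teams_with_points)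

-- ===== LEMMAS AND PROOFS =====

-- the text of one line, newline excluded
def pvLineStr (x : Int × String × Int) : String :=
  PySem.Int.toStr x.1 ++ ". " ++ x.2.1 ++ ", " ++ PySem.Int.toStr x.2.2 ++ " "
    ++ (if x.2.2 == 1 then "pt" else "pts")

-- join with "\n", structurally
def pvGlue : List String → String
  | [] => ""
  | [a] => a
  | a :: b :: t => a ++ "\n" ++ pvGlue (b :: t)

-- the (rank, name, points) triples A produces, as a recursion over the descending team list
def pvALines (twp : List (String × Int)) (cur prevRank : Int) (prev : Option String) :
    List (String × Int) → List (Int × String × Int)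
  | [] => []
  | np :: t =>
    let same : Bool :=
      match prev with
      | none => false
      | some pn => (PySem.Dict.get? (PySem.Dict.mk twp) np.1)
                    == (PySem.Dict.get? (PySem.Dict.mk twp) pn)
    let rank := if same then prevRank else cur + 1
    (rank, np.1, np.2) :: pvALines twp (cur + 1) rank (some np.1) t

-- the body of A's loop, as a function of the dequeued element
def pvBodyA (twp : List (String × Int)) (N : Int) (st : Int × Int × Int × Option String × String)
    (np : String × Int) : Int × Int × Int × Option String × String :=
  let (num_teams_placed, current_rank, previous_rank, prev, ranks) := st
  let same_points : Bool :=
    match prev with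
    | none => false
    | some pn => (PySem.Dict.get? (PySem.Dict.mk twp) np.1)
                  == (PySem.Dict.get? (PySem.Dict.mk twp) pn)
  let current_rank := current_rank + 1
  let rp : Int × Int :=
    if same_points then (previous_rank, previous_rank) else (current_rank, current_rank)
  let next_line : Bool := decide (num_teams_placed < N - 1)
  (num_teams_placed + 1, current_rank, rp.2, some np.1,
   ranks ++ pvRankFormatter rp.1 np.1 np.2 next_line)

-- number of teams of r with strictly more points than v
def pvC (r : List (String × Int)) (v : Int) : Int :=
  ((r.map Prod.snd).countP (fun q => decide (v < q)) : Int)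

-- B's rank of a team with p points: 1 + number of teams with strictly more points
def pvCnt (r : List (String × Int)) (p : Int) : Int := 1 + pvC r p

theorem pvGlue_cons_cons (a b : String) (t : List String) :
    pvGlue (a :: b :: t) = a ++ "\n" ++ pvGlue (b :: t) := rfl

theorem pvGlue_eq_join (ls : List String) : PySem.Str.join "\n" ls = pvGlue ls := by
  match ls with
  | [] => rfl
  | [a] => simp [PySem.Str.join, PySem.Chars.join_singleton, pvGlue]
  | a :: b :: t =>
    have ih := pvGlue_eq_join (b :: t)
    apply String.toList_inj.mp
    simp [PySem.Str.join, PySem.Chars.join_cons_cons, pvGlue, String.toList_append] at *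
    simp [← ih]

-- range(n-1, -1, -1) is n-1, n-2, …, 0
theorem pvRange_desc (n : Nat) :
    PySem.List.pyRange ((n : Int) - 1) (-1) (-1) = ((List.range n).reverse.map (Int.ofNat)) := by
  simp only [PySem.List.pyRange]
  rcases Nat.eq_zero_or_pos n with h | h
  · subst h; simp
  · rw [if_neg (by omega), if_neg (by omega), if_pos (by omega)]
    have hc : ((((n : Int) - 1) - -1 + - -1 - 1) / - -1).toNat = n := by norm_num
    rw [hc]
    apply List.ext_getElem (by simp)
    intro i h1 h2
    simp only [List.length_map, List.length_range] at h1
    simp only [List.getElem_map, List.getElem_reverse, List.getElem_range, List.length_range,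
      Int.ofNat_eq_natCast]
    omega

theorem pvGet_nat (xs : List (String × Int)) (m : Nat) (hm : m + 1 ≤ xs.length) :
    PySem.List.pyGet? xs ((m : Int)) = some xs[m] := by
  simp only [PySem.List.pyGet?, PySem.List.pyIdx?]
  rw [if_pos (by omega), if_pos (by exact_mod_cast (by omega : (m : Int) < xs.length))]
  simp [List.getElem?_eq_getElem (by omega : m < xs.length)]
  rfl

-- A's index loop over range(n-1, -1, -1) visits the sorted list back to front
theorem pvFold_desc {σ : Type} (xs : List (String × Int)) (f : σ → (String × Int) → σ) (s : σ) :
    (((List.range xs.length).reverse.map (Int.ofNat)).foldl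
      (fun st i => match PySem.List.pyGet? xs i with
        | none => st
        | some np => f st np) s) = xs.reverse.foldl f s := by
  have key : ∀ (m : Nat), m ≤ xs.length → ∀ s,
      (((List.range m).reverse.map (Int.ofNat)).foldl
        (fun st i => match PySem.List.pyGet? xs i with
          | none => st
          | some np => f st np) s) = (xs.take m).reverse.foldl f s := by
    intro m
    induction m with
    | zero => intro _ s; simp
    | succ m ih =>
      intro hm s
      have htake : xs.take (m + 1) = xs.take m ++ [xs[m]] := by
        rw [List.take_add_one]
        simp [List.getElem?_eq_getElem (by omega : m < xs.length)]
      rw [List.range_succ, List.reverse_append, List.map_append, List.foldl_append, htake,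
        List.reverse_append]
      simp only [List.reverse_singleton, List.map_cons, List.map_nil, List.foldl_cons,
        List.foldl_nil, Int.ofNat_eq_natCast, pvGet_nat xs m hm]
      exact ih (by omega) _
  have := key xs.length le_rfl s
  simpa using this

-- on a dict with distinct keys, looking a member pair's key up returns its value
theorem pvDict_get_of_mem (twp : List (String × Int)) (hnd : (twp.map Prod.fst).Nodup)
    (x : String × Int) (hx : x ∈ twp) :
    PySem.Dict.get? (PySem.Dict.mk twp) x.1 = some x.2 := by
  induction twp with
  | nil => cases hx
  | cons h t ih =>
    rw [PySem.Dict.get?_mk_cons]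
    simp only [List.map_cons, List.nodup_cons] at hnd
    rcases List.mem_cons.mp hx with rfl | hmem
    · rw [if_pos (by simp)]
    · rw [if_neg ?_]
      · exact ih hnd.2 hmem
      · simp only [beq_iff_eq]
        intro he
        exact hnd.1 (he ▸ List.mem_map_of_mem hmem)

-- on the points-descending list r, A's sequential rank rule produces exactly B's closed form
theorem pvRanks (twp r : List (String × Int))
    (hpw : r.Pairwise (fun a b : String × Int => b.2 ≤ a.2))
    (hget : ∀ x ∈ r, PySem.Dict.get? (PySem.Dict.mk twp) x.1 = some x.2) :
    ∀ (t pre : List (String × Int)) (prevRank : Int) (prev : Option String),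
    r = pre ++ t →
    (pre = [] → prev = none) →
    (∀ e : String × Int, pre.getLast? = some e → prev = some e.1 ∧ prevRank = pvCnt r e.2) →
    pvALines twp (pre.length : Int) prevRank prev t
      = t.map (fun np => (pvCnt r np.2, np.1, np.2)) := by
  intro t
  induction t with
  | nil => intro pre prevRank prev _ _ _; simp [pvALines]
  | cons np t' ih =>
    intro pre prevRank prev hr hnil hlast
    have hnp_mem : np ∈ r := by rw [hr]; simp
    have hget_np := hget np hnp_mem
    -- no team of np :: t' has strictly more points than np
    have hcnt2 : ((np :: t').map Prod.snd).countP (fun q => decide (np.2 < q)) = 0 := by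
      apply List.countP_eq_zero.mpr
      intro q hq
      simp only [List.map_cons, List.mem_cons] at hq
      rcases hq with rfl | hq
      · simp
      · rcases List.mem_map.mp hq with ⟨y, hy, rfl⟩
        have hrel := (List.pairwise_append.mp (hr ▸ hpw)).2.1
        have := (List.pairwise_cons.mp hrel).1 y hy
        simpa using not_lt.mpr this
    rcases eq_or_ne pre [] with hpre | hpre
    · -- first team: same_points = False, rank = 1
      subst hpre
      have hprev := hnil rfl
      subst hprev
      simp only [List.nil_append] at hr
      have hrank : pvCnt r np.2 = 1 := by
        rw [pvCnt, pvC, hr, hcnt2]; simp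
      have htail := ih [np] (pvCnt r np.2) (some np.1) (by simpa using hr) (by simp)
        (by intro e he; simp at he; subst he; exact ⟨rfl, rfl⟩)
      rw [hrank] at htail
      norm_num at htail
      simp only [pvALines, List.length_nil, Nat.cast_zero, List.map_cons, Bool.false_eq_true,
        if_false, zero_add, hrank, htail]
    · -- later team: prev is the name of the previous (higher-or-equal) team
      obtain ⟨e, hle⟩ : ∃ e, pre.getLast? = some e :=
        ⟨pre.getLast hpre, List.getLast?_eq_some_getLast hpre⟩
      obtain ⟨hprev, hpr⟩ := hlast e hle
      subst hprev
      have he_mem_pre : e ∈ pre := List.mem_of_getLast? hle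
      have hget_e := hget e (show e ∈ r by rw [hr]; exact List.mem_append_left _ he_mem_pre)
      have hlaste : pre.getLast hpre = e := by
        have h1 := List.getLast?_eq_some_getLast hpre
        rw [hle] at h1
        exact (Option.some_inj.mp h1).symm
      have hpre_split : pre.dropLast ++ [e] = pre := by
        rw [← hlaste]
        exact List.dropLast_concat_getLast hpre
      -- same_points compares the two dict values, i.e. the two points
      have hsame : ((PySem.Dict.get? (PySem.Dict.mk twp) np.1)
          == (PySem.Dict.get? (PySem.Dict.mk twp) e.1)) = (np.2 == e.2) := by
        rw [hget_np, hget_e]; rfl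
      have hrank : (if (np.2 == e.2) = true then prevRank else (pre.length : Int) + 1)
          = pvCnt r np.2 := by
        by_cases hpe : np.2 = e.2
        · simp [hpe, hpr]
        · rw [if_neg (by simpa using hpe)]
          have hsplit := List.pairwise_append.mp (hr ▸ hpw)
          have he_np : np.2 ≤ e.2 := hsplit.2.2 e he_mem_pre np (by simp)
          have he_np' : np.2 < e.2 := lt_of_le_of_ne he_np hpe
          have hall : ∀ x ∈ pre, np.2 < x.2 := by
            intro x hx
            rcases (by rw [← hpre_split] at hx; simpa using hx :
                x ∈ pre.dropLast ∨ x = e) with hx' | rfl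
            · have hpw_pre : (pre.dropLast ++ [e]).Pairwise
                  (fun a b : String × Int => b.2 ≤ a.2) := by
                rw [hpre_split]; exact hsplit.1
              have : e.2 ≤ x.2 := (List.pairwise_append.mp hpw_pre).2.2 x hx' e (by simp)
              exact lt_of_lt_of_le he_np' this
            · exact he_np'
          have hcnt1 : (pre.map Prod.snd).countP (fun q => decide (np.2 < q)) = pre.length := by
            rw [List.countP_eq_length.mpr]
            · simp
            · intro q hq
              rcases List.mem_map.mp hq with ⟨y, hy, rfl⟩
              simpa using hall y hy
          rw [pvCnt, pvC, hr, List.map_append, List.countP_append, hcnt1, hcnt2]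
          push_cast
          ring
      have htail := ih (pre ++ [np]) (pvCnt r np.2) (some np.1) (by rw [hr]; simp) (by simp)
        (by intro e' he'
            rw [List.getLast?_concat] at he'
            obtain rfl := (Option.some_inj.mp he').symm
            exact ⟨rfl, rfl⟩)
      have hcast : (((pre ++ [np]).length : Nat) : Int) = (pre.length : Int) + 1 := by simp
      rw [hcast] at htail
      simp only [pvALines, hsame, List.map_cons, hrank, htail]

theorem pvFmt_false (rank : Int) (name : String) (points : Int) :
    pvRankFormatter rank name points false = pvLineStr (rank, name, points) := rfl

theorem pvFmt_true (rank : Int) (name : String) (points : Int) :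
    pvRankFormatter rank name points true = pvLineStr (rank, name, points) ++ "\n" := by
  simp only [pvRankFormatter, pvLineStr, if_true, String.append_assoc]

-- A's fold appends exactly the pvALines lines, '\n'-separated, to the accumulator
theorem pvFoldA (twp : List (String × Int)) (N : Int) :
    ∀ (t : List (String × Int)) (acc : String) (placed cur prevRank : Int) (prev : Option String),
    placed + t.length = N →
    (t.foldl (pvBodyA twp N) (placed, cur, prevRank, prev, acc)).2.2.2.2
      = acc ++ pvGlue ((pvALines twp cur prevRank prev t).map pvLineStr) := by
  intro t
  induction t with
  | nil =>
    intro acc placed cur prevRank prev _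
    simp [pvALines, pvGlue, String.append_empty]
  | cons np t' ih =>
    intro acc placed cur prevRank prev hN
    simp only [List.foldl_cons]
    set same : Bool :=
      (match prev with
      | none => false
      | some pn => (PySem.Dict.get? (PySem.Dict.mk twp) np.1)
                    == (PySem.Dict.get? (PySem.Dict.mk twp) pn)) with hsame
    have hstep : pvBodyA twp N (placed, cur, prevRank, prev, acc) np
        = (placed + 1, cur + 1, (if same then prevRank else cur + 1), some np.1,
           acc ++ pvRankFormatter (if same then prevRank else cur + 1) np.1 np.2
             (decide (placed < N - 1))) := by
      simp only [pvBodyA, hsame]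
      split_ifs <;> rfl
    rw [hstep]
    simp only [List.length_cons] at hN
    push_cast at hN
    cases t' with
    | nil =>
      have hnl : (decide (placed < N - 1)) = false := by
        simp only [decide_eq_false_iff_not, not_lt]
        simp only [List.length_nil, Nat.cast_zero] at hN
        omega
      rw [hnl]
      have := ih (acc ++ pvRankFormatter (if same then prevRank else cur + 1) np.1 np.2 false)
        (placed + 1) (cur + 1) (if same then prevRank else cur + 1) (some np.1)
        (by omega)
      rw [this]
      simp only [pvALines, pvGlue, List.map_cons, List.map_nil, pvFmt_false]
      rw [String.append_empty]
    | cons np2 t'' =>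
      have hnl : (decide (placed < N - 1)) = true := by
        simp only [decide_eq_true_eq]
        simp only [List.length_cons] at hN
        push_cast at hN
        omega
      rw [hnl]
      have := ih (acc ++ pvRankFormatter (if same then prevRank else cur + 1) np.1 np.2 true)
        (placed + 1) (cur + 1) (if same then prevRank else cur + 1) (some np.1)
        (by omega)
      rw [this, pvFmt_true]
      simp only [pvALines, List.map_cons, pvGlue_cons_cons, String.append_assoc]
      rw [← hsame]

-- A, with its loop body named (definitional)
theorem pvA_as_body (twp : List (String × Int)) :
    league_rankings twp
      = ((PySem.List.pyRange (((PySem.List.sorted twp (fun x => x.2)).length : Int) - 1) (-1) (-1)).foldl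
          (fun st i =>
            match PySem.List.pyGet? (PySem.List.sorted twp (fun x => x.2)) i with
            | none => st
            | some np => pvBodyA twp ((PySem.List.sorted twp (fun x => x.2)).length : Int) st np)
          ((0 : Int), (0 : Int), (0 : Int), (none : Option String), "")).2.2.2.2 := rfl

-- the first-index dict B builds maps each points value of r to its strictly-greater count
theorem pvHigher (r : List (String × Int))
    (hpw : r.Pairwise (fun a b : String × Int => b.2 ≤ a.2)) :
    ∀ (t pre : List (String × Int)) (d : PySem.Dict Int Int),
    r = pre ++ t →
    (∀ v : Int, d.get? v = if v ∈ pre.map Prod.snd then some (pvC r v) else none) →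
    ∀ v : Int,
      ((t.foldl (fun (s : Int × PySem.Dict Int Int) np =>
          (s.1 + 1, if s.2.contains np.2 then s.2 else s.2.insert np.2 s.1))
          ((pre.length : Int), d)).2).get? v
        = if v ∈ r.map Prod.snd then some (pvC r v) else none := by
  intro t
  induction t with
  | nil =>
    intro pre d hr hd v
    rw [List.append_nil] at hr
    subst hr
    simpa using hd v
  | cons np t' ih =>
    intro pre d hr hd v
    simp only [List.foldl_cons]
    have hcast : ((pre ++ [np]).length : Int) = (pre.length : Int) + 1 := by simp
    have hr' : r = (pre ++ [np]) ++ t' := by rw [hr]; simp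
    -- when np.2 is new, its first index pre.length is exactly its strictly-greater count
    have hnew : np.2 ∉ pre.map Prod.snd → pvC r np.2 = (pre.length : Int) := by
      intro hnot
      have hsplit := List.pairwise_append.mp (hr ▸ hpw)
      have hcnt2 : ((np :: t').map Prod.snd).countP (fun q => decide (np.2 < q)) = 0 := by
        apply List.countP_eq_zero.mpr
        intro q hq
        simp only [List.map_cons, List.mem_cons] at hq
        rcases hq with rfl | hq
        · simp
        · rcases List.mem_map.mp hq with ⟨y, hy, rfl⟩
          have := (List.pairwise_cons.mp hsplit.2.1).1 y hy
          simpa using not_lt.mpr this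
      have hcnt1 : (pre.map Prod.snd).countP (fun q => decide (np.2 < q)) = pre.length := by
        rw [List.countP_eq_length.mpr]
        · simp
        · intro q hq
          rcases List.mem_map.mp hq with ⟨y, hy, rfl⟩
          have hle : np.2 ≤ y.2 := hsplit.2.2 y hy np (by simp)
          have hne : np.2 ≠ y.2 := fun h => hnot (h ▸ List.mem_map_of_mem hy)
          simpa using lt_of_le_of_ne hle hne
      rw [pvC, hr, List.map_append, List.countP_append, hcnt1, hcnt2]
      push_cast; ring
    by_cases hc : d.contains np.2 = true
    · rw [if_pos hc]
      have hmem : np.2 ∈ pre.map Prod.snd := by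
        by_contra hnot
        have := hd np.2
        rw [if_neg hnot] at this
        rw [PySem.Dict.contains_eq_isSome_get?, this] at hc
        simp at hc
      have hinv : ∀ w : Int, d.get? w
          = if w ∈ (pre ++ [np]).map Prod.snd then some (pvC r w) else none := by
        intro w
        rw [hd w]
        by_cases hw : w ∈ pre.map Prod.snd
        · rw [if_pos hw, if_pos (by simp [hw])]
        · rw [if_neg hw, if_neg ?_]
          simp only [List.map_append, List.mem_append, List.map_cons, List.map_nil,
            List.mem_singleton]
          rintro (h | h)
          · exact hw h
          · subst h; exact hw hmem
      have hih := ih (pre ++ [np]) d hr' hinv v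
      rw [← hcast]
      exact hih
    · rw [if_neg hc]
      have hnot : np.2 ∉ pre.map Prod.snd := by
        intro hmem
        have := hd np.2
        rw [if_pos hmem] at this
        rw [PySem.Dict.contains_eq_isSome_get?, this] at hc
        simp at hc
      have hinv : ∀ w : Int, (d.insert np.2 ((pre.length : Nat) : Int)).get? w
          = if w ∈ (pre ++ [np]).map Prod.snd then some (pvC r w) else none := by
        intro w
        by_cases hw : w = np.2
        · subst hw
          rw [PySem.Dict.get?_insert_self, if_pos (by simp), hnew hnot]
        · rw [PySem.Dict.get?_insert_of_ne (hne := hw), hd w]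
          by_cases hw2 : w ∈ pre.map Prod.snd
          · rw [if_pos hw2, if_pos (by simp [hw2])]
          · rw [if_neg hw2, if_neg ?_]
            simp only [List.map_append, List.mem_append, List.map_cons, List.map_nil,
              List.mem_singleton]
            rintro (h | h)
            · exact hw2 h
            · exact hw h
      have hih := ih (pre ++ [np]) (d.insert np.2 ((pre.length : Nat) : Int)) hr' hinv v
      rw [← hcast]
      exact hih

-- B, as Str.join over the closed-form ranked lines
theorem pvB_eq (twp : List (String × Int)) :
    league_rankings_alt twp
      = PySem.Str.join "\n"
          ((((PySem.List.sorted twp (fun x => x.2)).reverse).map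
            (fun np => (pvCnt ((PySem.List.sorted twp (fun x => x.2)).reverse) np.2,
              np.1, np.2))).map pvLineStr) := by
  unfold league_rankings_alt
  rw [PySem.List.slice?_none_none_neg_one]
  simp only [Option.getD_some, List.map_map]
  have hpw : ((PySem.List.sorted twp (fun x => x.2)).reverse).Pairwise
      (fun a b : String × Int => b.2 ≤ a.2) :=
    List.pairwise_reverse.mpr (PySem.List.sorted_pairwise twp (fun x => x.2))
  have hD := pvHigher ((PySem.List.sorted twp (fun x => x.2)).reverse) hpw
    ((PySem.List.sorted twp (fun x => x.2)).reverse) [] PySem.Dict.empty (by simp)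
    (by intro v; simp [PySem.Dict.get?_empty])
  simp only [List.length_nil, Nat.cast_zero] at hD
  have hmap := List.map_congr_left (l := (PySem.List.sorted twp (fun x => x.2)).reverse)
    (f := fun np : String × Int =>
      PySem.Int.toStr (1 + (((((PySem.List.sorted twp (fun x => x.2)).reverse).foldl
          (fun (s : Int × PySem.Dict Int Int) np =>
            (s.1 + 1, if s.2.contains np.2 then s.2 else s.2.insert np.2 s.1))
          ((0 : Int), PySem.Dict.empty)).2).get? np.2).getD 0) ++ ". " ++ np.1 ++ ", "
        ++ PySem.Int.toStr np.2 ++ " " ++ (if np.2 == 1 then "pt" else "pts"))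
    (g := pvLineStr ∘ fun np : String × Int =>
      (pvCnt ((PySem.List.sorted twp (fun x => x.2)).reverse) np.2, np.1, np.2))
    (by
      intro np hnp
      beta_reduce
      rw [hD np.2, if_pos (List.mem_map_of_mem hnp)]
      simp only [Option.getD_some, Function.comp, pvLineStr, pvCnt])
  rw [hmap]

-- ===== VERDICT (by name: the statement is the Claim_ definition above) =====
theorem league_rankings_spec : Claim_equal_league_rankings := by
  unfold Claim_equal_league_rankings Spec_league_rankings
  intro twp _hdom hpre
  obtain ⟨hne, hnd⟩ := hpre
  have hpw : ((PySem.List.sorted twp (fun x => x.2)).reverse).Pairwise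
      (fun a b : String × Int => b.2 ≤ a.2) :=
    List.pairwise_reverse.mpr (PySem.List.sorted_pairwise twp (fun x => x.2))
  have hget : ∀ x ∈ (PySem.List.sorted twp (fun x => x.2)).reverse,
      PySem.Dict.get? (PySem.Dict.mk twp) x.1 = some x.2 := by
    intro x hx
    exact pvDict_get_of_mem twp hnd x
      ((PySem.List.mem_sorted twp (fun y => y.2) false x).mp (List.mem_reverse.mp hx))
  have hA := pvA_as_body twp
  rw [pvRange_desc, pvFold_desc] at hA
  rw [pvFoldA twp ((PySem.List.sorted twp (fun x => x.2)).length : Int)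
    ((PySem.List.sorted twp (fun x => x.2)).reverse) "" 0 0 0 none (by simp)] at hA
  have hR := pvRanks twp ((PySem.List.sorted twp (fun x => x.2)).reverse) hpw hget
    ((PySem.List.sorted twp (fun x => x.2)).reverse) [] 0 none (by simp) (fun _ => rfl)
    (by intro e he; simp at he)
  simp only [List.length_nil, Nat.cast_zero] at hR
  rw [hR, String.empty_append] at hA
  rw [hA, pvB_eq, pvGlue_eq_join]
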